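-- pv_equiv track=rewrite | github.com/des137/quantum-som | src/qsom/error_mitigation.py | untwirl_counts
-- ===== SOURCE A (Python) =====
-- from typing import List, Dict, Optional, Tuple, Callable, Any
--
-- def untwirl_counts(
--
--     counts: Dict[str, int],
--     twirl: List[str]
-- ) -> Dict[str, int]:
--     """
--     Untwirl measurement results.
--
--     Args:
--         counts: Raw counts from twirled circuit.
--         twirl: Pauli twirl that was applied.
--
--     Returns:
--         Untwirled counts.
--     """
--     untwirled = {}
--
--     for bitstring, count in counts.items():
--         # X and Y flip bits, Z and I don't
--         new_bits = list(bitstring[::-1])  # Reverse for qubit ordering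
--
--         for i, pauli in enumerate(twirl):
--             if pauli in ['X', 'Y']:
--                 new_bits[i] = '1' if new_bits[i] == '0' else '0'
--
--         new_bitstring = ''.join(new_bits[::-1])
--         untwirled[new_bitstring] = untwirled.get(new_bitstring, 0) + count
--
--     return untwirled
-- ===== SOURCE B (Python) =====
-- def _flip_at(key, i):
--     """Flip the bit of key at twirl position i (counted from the right) by
--     string-slice surgery; positions beyond the key are left untouched."""
--     if i < len(key):
--         pos = len(key) - 1 - i
--         return key[:pos] + ('1' if key[pos] == '0' else '0') + key[pos + 1:]
--     return key
--
--
-- def untwirl_counts(counts, twirl):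
--     """Gate-major untwirl: apply each X/Y twirl gate to ALL keys at once
--     (one slice-splice pass per gate), then aggregate in a single pass."""
--     items = list(counts.items())
--     for i, p in enumerate(twirl):
--         if p in ('X', 'Y'):
--             items = [(_flip_at(k, i), c) for k, c in items]
--     untwirled = {}
--     for k, c in items:
--         untwirled[k] = untwirled.get(k, 0) + c
--     return untwirled
-- ===== Notes on version B (the rewrite author's own statement) =====
-- stated objective: faster
-- what changed: B swaps the loop order: instead of A's per-key reverse-to-list walk over the whole twirl, B applies each X/Y gate to all keys at once by slice-splicing one character per key, and aggregates the rewritten pairs in a single final pass.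
import Mathlib
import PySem

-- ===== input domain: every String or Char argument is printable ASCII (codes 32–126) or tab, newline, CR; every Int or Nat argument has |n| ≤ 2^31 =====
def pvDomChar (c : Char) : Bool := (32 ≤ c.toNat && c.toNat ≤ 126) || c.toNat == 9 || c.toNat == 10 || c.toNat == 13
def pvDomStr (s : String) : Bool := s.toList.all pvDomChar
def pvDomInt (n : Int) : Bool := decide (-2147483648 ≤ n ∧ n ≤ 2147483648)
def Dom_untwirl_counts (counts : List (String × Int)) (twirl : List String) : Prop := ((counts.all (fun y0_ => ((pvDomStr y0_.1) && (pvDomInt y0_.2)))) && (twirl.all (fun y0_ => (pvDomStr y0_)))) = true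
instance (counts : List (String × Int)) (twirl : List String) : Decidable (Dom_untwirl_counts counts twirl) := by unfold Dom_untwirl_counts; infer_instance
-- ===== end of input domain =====

-- B swaps the loop order: each X/Y gate is applied to ALL keys at once by
-- slice-splicing one character per key, then one final aggregation pass
-- (objective: faster; a timing run measured B faster).

-- ===== PORT A =====
def pvFlip (c : Char) : Char := if c = '0' then '1' else '0'

-- 'for i, pauli in enumerate(twirl): if pauli in ["X","Y"]: new_bits[i] = …'
-- (Python raises IndexError when new_bits[i] is out of range; that case, excluded by Pre_, leaves bits unchanged here)
def pvTwirlLoop : List String → Nat → List Char → List Char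
  | [], _, bits => bits
  | p :: rest, i, bits =>
    pvTwirlLoop rest (i + 1)
      (if p = "X" ∨ p = "Y" then
        match bits[i]? with
        | some c => bits.set i (pvFlip c)
        | none => bits
      else bits)

def untwirl_counts (counts : List (String × Int)) (twirl : List String) : List (String × Int) :=
  (counts.foldl
    (fun (d : PySem.Dict String Int) bc =>
      let new_bits := bc.1.toList.reverse
      let nb := pvTwirlLoop twirl 0 new_bits
      let new_bitstring := String.ofList nb.reverse
      d.insert new_bitstring (d.getD new_bitstring 0 + bc.2))
    PySem.Dict.empty).items

-- ===== PORT B =====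
-- '_flip_at(key, i)': key[:pos] + flipped char + key[pos+1:]   (slices and the
-- in-range index ported as take/getD/drop, exact since 0 ≤ pos < len(key))
def pvFlipAt (k : String) (i : Nat) : String :=
  if i < k.toList.length then
    let pos := k.toList.length - 1 - i
    String.ofList (k.toList.take pos ++
      [if k.toList.getD pos ' ' = '0' then '1' else '0'] ++ k.toList.drop (pos + 1))
  else k

-- 'for i, p in enumerate(twirl): if p in ("X","Y"): items = [(_flip_at(k, i), c) …]'
def pvGatePass : List String → Nat → List (String × Int) → List (String × Int)
  | [], _, items => items
  | p :: rest, i, items =>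
    pvGatePass rest (i + 1)
      (if p = "X" ∨ p = "Y" then items.map (fun kc => (pvFlipAt kc.1 i, kc.2)) else items)

def untwirl_counts_alt (counts : List (String × Int)) (twirl : List String) : List (String × Int) :=
  let items := pvGatePass twirl 0 counts
  (items.foldl
    (fun (d : PySem.Dict String Int) kc => d.insert kc.1 (d.getD kc.1 0 + kc.2))
    PySem.Dict.empty).items

-- ===== PRECONDITION & SPEC =====
-- Pre_ excludes exactly the inputs where A raises IndexError: an 'X'/'Y' twirl entry
-- at an index not smaller than some key's length.
def Pre_untwirl_counts (counts : List (String × Int)) (twirl : List String) : Prop :=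
  ∀ bc ∈ counts, ∀ j < twirl.length,
    (twirl.getD j "" = "X" ∨ twirl.getD j "" = "Y") → j < bc.1.toList.length
instance (counts : List (String × Int)) (twirl : List String) : Decidable (Pre_untwirl_counts counts twirl) := by
  unfold Pre_untwirl_counts; infer_instance

def pvWitness_untwirl_counts : (List (String × Int)) × List String :=
  ([("01", 3), ("10", 2)], ["X", "I"])

def Spec_untwirl_counts (counts : List (String × Int)) (twirl : List String) (out : List (String × Int)) : Prop := out = untwirl_counts_alt counts twirl
instance (counts : List (String × Int)) (twirl : List String) (out : List (String × Int)) : Decidable (Spec_untwirl_counts counts twirl out) := by unfold Spec_untwirl_counts; infer_instance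

-- ===== CLAIM (what is proved, stated in full; the proofs are below) =====
def Claim_equal_untwirl_counts : Prop := ∀ (counts : List (String × Int)) (twirl : List String), Dom_untwirl_counts counts twirl → Pre_untwirl_counts counts twirl → Spec_untwirl_counts counts twirl (untwirl_counts counts twirl)

-- ===== LEMMAS AND PROOFS =====

-- whether twirl flips position k (counted from the right)
abbrev pvShould (tw : List String) (k : Nat) : Prop :=
  k < tw.length ∧ (tw.getD k "" = "X" ∨ tw.getD k "" = "Y")

lemma pvTwirlLoop_getElem? (tw : List String) (i : Nat) (bits : List Char) (k : Nat) :
    (pvTwirlLoop tw i bits)[k]? =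
      if i ≤ k ∧ pvShould tw (k - i) then (bits[k]?).map pvFlip else bits[k]? := by
  induction tw generalizing i bits with
  | nil => simp [pvTwirlLoop, pvShould]
  | cons p rest ih =>
    rw [pvTwirlLoop, ih]
    by_cases hik : i + 1 ≤ k
    · have hbk : (if p = "X" ∨ p = "Y" then
          match bits[i]? with
          | some c => bits.set i (pvFlip c)
          | none => bits
        else bits)[k]? = bits[k]? := by
        split_ifs with hp
        · cases bits[i]? with
          | none => rfl
          | some c => exact List.getElem?_set_ne (by omega)
        · rfl
      rw [hbk]
      have hcond : (i + 1 ≤ k ∧ pvShould rest (k - (i + 1))) ↔ (i ≤ k ∧ pvShould (p :: rest) (k - i)) := by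
        have he : k - i = (k - (i + 1)) + 1 := by omega
        simp only [pvShould]
        rw [he, List.getD_cons_succ]
        simp only [List.length_cons]
        constructor
        · rintro ⟨_, h1, h2⟩; exact ⟨by omega, by omega, h2⟩
        · rintro ⟨_, h1, h2⟩; exact ⟨by omega, by omega, h2⟩
      rw [if_congr hcond rfl rfl]
    · have hc1 : ¬ (i + 1 ≤ k ∧ pvShould rest (k - (i + 1))) := by rintro ⟨h, _⟩; omega
      rw [if_neg hc1]
      by_cases hki : k = i
      · subst hki
        have hc2 : (k ≤ k ∧ pvShould (p :: rest) (k - k)) ↔ (p = "X" ∨ p = "Y") := by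
          simp only [pvShould]
          rw [Nat.sub_self, List.getD_cons_zero]
          simp only [List.length_cons]
          constructor
          · rintro ⟨_, _, h⟩; exact h
          · intro h; exact ⟨le_refl _, by omega, h⟩
        by_cases hp : p = "X" ∨ p = "Y"
        · rw [if_pos (hc2.mpr hp), if_pos hp]
          cases hbk : bits[k]? with
          | none => simp [hbk]
          | some c =>
            have hlt : k < bits.length := by
              by_contra hh
              rw [List.getElem?_eq_none_iff.2 (by omega)] at hbk
              exact absurd hbk (by simp)
            simp [hlt, pvFlip]
        · rw [if_neg (fun h => hp (hc2.mp h)), if_neg hp]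
      · have hc2 : ¬ (i ≤ k ∧ pvShould (p :: rest) (k - i)) := by rintro ⟨h, _⟩; omega
        rw [if_neg hc2]
        split_ifs with hp
        · cases bits[i]? with
          | none => rfl
          | some c => exact List.getElem?_set_ne (by omega)
        · rfl

-- sequential application of pvFlipAt gate by gate: what pvGatePass does to one key
def pvApply : List String → Nat → String → String
  | [], _, k => k
  | p :: rest, i, k => pvApply rest (i + 1) (if p = "X" ∨ p = "Y" then pvFlipAt k i else k)

lemma pvGatePass_eq_map (tw : List String) : ∀ (i : Nat) (items : List (String × Int)),
    pvGatePass tw i items = items.map (fun kc => (pvApply tw i kc.1, kc.2)) := by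
  induction tw with
  | nil => intro i items; simp [pvGatePass, pvApply]
  | cons p rest ih =>
    intro i items
    rw [pvGatePass]
    split_ifs with hp
    · rw [ih, List.map_map]
      apply List.map_congr_left
      intro kc _
      simp [pvApply, hp]
    · rw [ih]
      apply List.map_congr_left
      intro kc _
      simp [pvApply, hp]

lemma pvFlipAt_toList (k : String) (i : Nat) (h : i < k.toList.length) :
    (pvFlipAt k i).toList = k.toList.take (k.toList.length - 1 - i) ++
      [pvFlip (k.toList.getD (k.toList.length - 1 - i) ' ')] ++
      k.toList.drop (k.toList.length - 1 - i + 1) := by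
  rw [pvFlipAt, if_pos h]
  simp [pvFlip]

lemma pvFlipAt_length (k : String) (i : Nat) (h : i < k.toList.length) :
    (pvFlipAt k i).toList.length = k.toList.length := by
  rw [pvFlipAt_toList k i h]
  simp only [List.length_append, List.length_take, List.length_cons, List.length_nil,
    List.length_drop]
  omega

lemma pvFlipAt_getElem? (k : String) (i : Nat) (h : i < k.toList.length) (j : Nat) :
    (pvFlipAt k i).toList[j]? =
      if j = k.toList.length - 1 - i then (k.toList[j]?).map pvFlip else k.toList[j]? := by
  rw [pvFlipAt_toList k i h]
  set cs := k.toList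
  set pos := cs.length - 1 - i with hpos
  have hposlt : pos < cs.length := by omega
  by_cases h1 : j < pos
  · rw [if_neg (by omega), List.getElem?_append_left (by simp [List.length_take]; omega),
      List.getElem?_append_left (by simp [List.length_take]; omega), List.getElem?_take,
      if_pos h1]
  · by_cases h2 : j = pos
    · subst h2
      rw [if_pos rfl,
        List.getElem?_append_left (show pos < (cs.take pos ++ [pvFlip (cs.getD pos ' ')]).length
          by simp [List.length_take]; omega)]
      have h4 : (cs.take pos ++ [pvFlip (cs.getD pos ' ')])[pos]? =
          some (pvFlip (cs.getD pos ' ')) := by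
        have h5 := List.getElem?_concat_length (l := cs.take pos) (a := pvFlip (cs.getD pos ' '))
        rwa [List.length_take, Nat.min_eq_left (by omega)] at h5
      rw [h4, List.getElem?_eq_getElem hposlt]
      simp [List.getElem?_eq_getElem hposlt]
    · rw [if_neg h2, List.getElem?_append_right (by simp [List.length_take]; omega),
        List.getElem?_drop]
      have hl : (cs.take pos ++ [pvFlip (cs.getD pos ' ')]).length = pos + 1 := by
        simp [List.length_take]; omega
      rw [hl]
      congr 1
      omega

lemma pvFlipAt_reverse_getElem? (k : String) (i : Nat) (h : i < k.toList.length) (r : Nat) :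
    (pvFlipAt k i).toList.reverse[r]? =
      if r = i then (k.toList.reverse[r]?).map pvFlip else k.toList.reverse[r]? := by
  set cs := k.toList
  have hn : (pvFlipAt k i).toList.length = cs.length := pvFlipAt_length k i h
  by_cases hr : r < cs.length
  · rw [List.getElem?_reverse (by omega), hn, List.getElem?_reverse hr,
      pvFlipAt_getElem? k i h]
    have hiff : (cs.length - 1 - r = cs.length - 1 - i) ↔ (r = i) := by omega
    rw [if_congr hiff rfl rfl]
  · rw [List.getElem?_eq_none_iff.2 (by rw [List.length_reverse, hn]; omega),
      List.getElem?_eq_none_iff.2 (by rw [List.length_reverse]; omega),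
      if_neg (by omega)]

lemma pvApply_reverse_getElem? (tw : List String) : ∀ (i : Nat) (k : String),
    (∀ o < tw.length, (tw.getD o "" = "X" ∨ tw.getD o "" = "Y") → i + o < k.toList.length) →
    ∀ r, (pvApply tw i k).toList.reverse[r]? =
      if i ≤ r ∧ pvShould tw (r - i) then (k.toList.reverse[r]?).map pvFlip
      else k.toList.reverse[r]? := by
  induction tw with
  | nil => intro i k _ r; simp [pvApply, pvShould]
  | cons p rest ih =>
    intro i k hfit r
    rw [pvApply]
    have hk'len : (if p = "X" ∨ p = "Y" then pvFlipAt k i else k).toList.length = k.toList.length := by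
      split_ifs with hp
      · exact pvFlipAt_length k i (by
          have := hfit 0 (by simp) (by simpa using hp)
          omega)
      · rfl
    rw [ih (i + 1) _ (fun o ho hxy => by
      rw [hk'len]
      have := hfit (o + 1) (by simp only [List.length_cons]; omega)
        (by simpa [List.getD_cons_succ] using hxy)
      omega) r]
    have hk'r : ∀ r', (if p = "X" ∨ p = "Y" then pvFlipAt k i else k).toList.reverse[r']? =
        if r' = i ∧ (p = "X" ∨ p = "Y") then (k.toList.reverse[r']?).map pvFlip
        else k.toList.reverse[r']? := by
      intro r'
      by_cases hp : p = "X" ∨ p = "Y"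
      · rw [if_pos hp, pvFlipAt_reverse_getElem? k i (by
          have := hfit 0 (by simp) (by simpa using hp)
          omega) r']
        rw [if_congr (and_iff_left hp).symm rfl rfl]
      · rw [if_neg hp]
        rw [if_neg (by rintro ⟨_, h⟩; exact hp h)]
    by_cases hik : i + 1 ≤ r
    · have hinner : (if p = "X" ∨ p = "Y" then pvFlipAt k i else k).toList.reverse[r]? =
          k.toList.reverse[r]? := by
        rw [hk'r r, if_neg (show ¬ (r = i ∧ (p = "X" ∨ p = "Y")) by rintro ⟨h, _⟩; omega)]
      rw [hinner]
      have hcond : (i + 1 ≤ r ∧ pvShould rest (r - (i + 1))) ↔ (i ≤ r ∧ pvShould (p :: rest) (r - i)) := by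
        have he : r - i = (r - (i + 1)) + 1 := by omega
        simp only [pvShould]
        rw [he, List.getD_cons_succ]
        simp only [List.length_cons]
        constructor
        · rintro ⟨_, h1, h2⟩; exact ⟨by omega, by omega, h2⟩
        · rintro ⟨_, h1, h2⟩; exact ⟨by omega, by omega, h2⟩
      rw [if_congr hcond rfl rfl]
    · have hc1 : ¬ (i + 1 ≤ r ∧ pvShould rest (r - (i + 1))) := by rintro ⟨h, _⟩; omega
      rw [if_neg hc1]
      by_cases hri : r = i
      · subst hri
        have hc2 : (r ≤ r ∧ pvShould (p :: rest) (r - r)) ↔ (p = "X" ∨ p = "Y") := by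
          simp only [pvShould]
          rw [Nat.sub_self, List.getD_cons_zero]
          simp only [List.length_cons]
          constructor
          · rintro ⟨_, _, h⟩; exact h
          · intro h; exact ⟨le_refl _, by omega, h⟩
        by_cases hp : p = "X" ∨ p = "Y"
        · rw [hk'r r, if_pos ⟨rfl, hp⟩, if_pos (hc2.mpr hp)]
        · rw [hk'r r, if_neg (show ¬ (r = r ∧ (p = "X" ∨ p = "Y")) by rintro ⟨_, h⟩; exact hp h),
            if_neg (fun h => hp (hc2.mp h))]
      · have hc2 : ¬ (i ≤ r ∧ pvShould (p :: rest) (r - i)) := by rintro ⟨h, _⟩; omega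
        rw [if_neg hc2, hk'r r, if_neg (show ¬ (r = i ∧ (p = "X" ∨ p = "Y")) by rintro ⟨h, _⟩; exact hri h)]

lemma pvKey_eq (tw : List String) (k : String)
    (hfit : ∀ j < tw.length, (tw.getD j "" = "X" ∨ tw.getD j "" = "Y") → j < k.toList.length) :
    String.ofList ((pvTwirlLoop tw 0 k.toList.reverse).reverse) = pvApply tw 0 k := by
  rw [← String.ofList_toList (s := pvApply tw 0 k)]
  congr 1
  rw [← List.reverse_inj, List.reverse_reverse]
  apply List.ext_getElem?
  intro r
  rw [pvTwirlLoop_getElem?,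
    pvApply_reverse_getElem? tw 0 k (fun o ho hxy => by simpa using hfit o ho hxy) r]

-- ===== VERDICT (by name: the statement is the Claim_ definition above) =====
theorem untwirl_counts_spec : Claim_equal_untwirl_counts := by
  intro counts twirl _ hpre
  unfold Spec_untwirl_counts
  simp only [untwirl_counts, untwirl_counts_alt]
  rw [pvGatePass_eq_map, List.foldl_map]
  congr 1
  apply PySem.List.foldl_congr_mem'
  intro bc hmem d
  dsimp only
  rw [pvKey_eq twirl bc.1 (fun j hj hxy => hpre bc hmem j hj hxy)]
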